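-- pv_equiv track=rewrite | github.com/ZoeLoveHGJ/Project_LODS_MTI | lods_mti_limit_algo.py | _find_perfect_seed
-- ===== SOURCE A (Python) =====
-- from typing import List, Tuple, Any, Set, Optional
--
-- def _find_perfect_seed(epc_ints: List[int], mod_size: int) -> Optional[int]:
--     # 寻找完美哈希种子
--     for seed in range(16):
--         slots = set()
--         collision = False
--         for val in epc_ints:
--             # 这里的 mod_size 在 limit 版本中大概率也是 2^n
--             # 这证明了硬件上无需除法器
--             s = (val ^ seed) % mod_size
--             if s in slots:
--                 collision = True
--                 break
--             slots.add(s)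
--         if not collision:
--             return seed
--     return None
-- ===== SOURCE B (Python) =====
-- def _find_perfect_seed(epc_ints, mod_size):
--     # Loop inversion: one pass over the data, keeping all 16 candidate seeds alive
--     # in parallel (each with its own slot set) and pruning a seed the moment it
--     # collides; the first surviving seed (range order is preserved) is the answer.
--     alive = [(seed, set()) for seed in range(16)]
--     for val in epc_ints:
--         nxt = []
--         for seed, slots in alive:
--             s = (val ^ seed) % mod_size
--             if s not in slots:
--                 slots.add(s)
--                 nxt.append((seed, slots))
--         alive = nxt
--         if not alive:
--             return None
--     return alive[0][0] if alive else None
-- ===== Notes on version B (the rewrite author's own statement) =====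
-- stated objective: alternative
-- what changed: Inverts the loops: instead of restarting a fresh scan of the data for each seed in turn, B makes a single pass over the data maintaining all 16 candidate seeds in parallel (each with its own slot set), pruning a seed as soon as it collides and returning the first survivor.
import Mathlib
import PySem

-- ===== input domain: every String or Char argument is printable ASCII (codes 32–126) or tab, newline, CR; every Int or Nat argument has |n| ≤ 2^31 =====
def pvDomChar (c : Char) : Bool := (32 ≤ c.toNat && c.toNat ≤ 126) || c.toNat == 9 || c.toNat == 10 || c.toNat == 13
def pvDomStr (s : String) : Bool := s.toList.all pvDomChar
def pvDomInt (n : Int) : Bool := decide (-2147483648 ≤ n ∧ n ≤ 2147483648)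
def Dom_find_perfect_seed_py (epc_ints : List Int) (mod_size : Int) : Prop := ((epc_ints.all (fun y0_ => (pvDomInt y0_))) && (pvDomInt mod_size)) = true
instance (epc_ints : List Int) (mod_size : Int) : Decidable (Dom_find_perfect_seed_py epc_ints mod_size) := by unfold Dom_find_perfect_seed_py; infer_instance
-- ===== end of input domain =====

-- B inverts A's loops: one pass over the data pruning all 16 candidate seeds in parallel
-- (each with its own slot set), instead of a fresh per-seed scan; alternative structure, same cost.


-- ===== PORT A =====
-- inner 'for val in epc_ints: … break' loop, returning the final value of 'collision'
def pvCollisionLoop (vals : List Int) (seed mod_size : Int) (slots : PySem.Set Int) : Bool :=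
  match vals with
  | [] => false
  | v :: rest =>
    let s := PySem.Int.mod (PySem.Int.bxor v seed) mod_size
    if PySem.Set.contains slots s then true
    else pvCollisionLoop rest seed mod_size (PySem.Set.add slots s)

-- outer 'for seed in range(16)' loop with the early 'return seed'
def pvSeedLoop (seeds : List Int) (epc_ints : List Int) (mod_size : Int) : Option Int :=
  match seeds with
  | [] => none
  | seed :: rest =>
    if pvCollisionLoop epc_ints seed mod_size PySem.Set.empty = false then some seed
    else pvSeedLoop rest epc_ints mod_size

def find_perfect_seed_py (epc_ints : List Int) (mod_size : Int) : Option Int :=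
  pvSeedLoop (PySem.List.pyRange 0 16 1) epc_ints mod_size

-- ===== PORT B =====
-- inner 'for seed, slots in alive' loop: keep a candidate iff its hash is fresh, updating its slot set
def pvPrune (mod_size v : Int) (alive : List (Int × PySem.Set Int)) : List (Int × PySem.Set Int) :=
  alive.filterMap (fun p =>
    let s := PySem.Int.mod (PySem.Int.bxor v p.1) mod_size
    if PySem.Set.contains p.2 s then none else some (p.1, PySem.Set.add p.2 s))

-- outer 'for val in epc_ints' loop with the early 'return None' and final 'alive[0][0] if alive else None'
def pvAltLoop (vals : List Int) (mod_size : Int) (alive : List (Int × PySem.Set Int)) : Option Int :=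
  match vals with
  | [] => alive.head?.map (·.1)
  | v :: rest =>
    let nxt := pvPrune mod_size v alive
    if nxt.isEmpty then none else pvAltLoop rest mod_size nxt

def find_perfect_seed_py_alt (epc_ints : List Int) (mod_size : Int) : Option Int :=
  pvAltLoop epc_ints mod_size ((PySem.List.pyRange 0 16 1).map (fun seed => (seed, PySem.Set.empty)))

-- ===== PRECONDITION & SPEC =====
-- A raises ZeroDivisionError when mod_size = 0 and the list is non-empty; excluded.
def Pre_find_perfect_seed_py (epc_ints : List Int) (mod_size : Int) : Prop :=
  epc_ints = [] ∨ mod_size ≠ 0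
instance (epc_ints : List Int) (mod_size : Int) : Decidable (Pre_find_perfect_seed_py epc_ints mod_size) := by unfold Pre_find_perfect_seed_py; infer_instance
def pvWitness_find_perfect_seed_py : List Int × Int := ([1, 2, 3], 4)

def Spec_find_perfect_seed_py (epc_ints : List Int) (mod_size : Int) (out : Option Int) : Prop := out = find_perfect_seed_py_alt epc_ints mod_size
instance (epc_ints : List Int) (mod_size : Int) (out : Option Int) : Decidable (Spec_find_perfect_seed_py epc_ints mod_size out) := by unfold Spec_find_perfect_seed_py; infer_instance

-- ===== CLAIM (what is proved, stated in full; the proofs are below) =====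
def Claim_equal_find_perfect_seed_py : Prop := ∀ (epc_ints : List Int) (mod_size : Int), Dom_find_perfect_seed_py epc_ints mod_size → Pre_find_perfect_seed_py epc_ints mod_size → Spec_find_perfect_seed_py epc_ints mod_size (find_perfect_seed_py epc_ints mod_size)

-- ===== LEMMAS AND PROOFS =====

-- pruning by one value then surviving the rest = surviving the whole list (seed components)
theorem prune_filter_map_fst (mod_size v : Int) (rest : List Int) :
    ∀ alive : List (Int × PySem.Set Int),
      ((pvPrune mod_size v alive).filter
          (fun p => !pvCollisionLoop rest p.1 mod_size p.2)).map (·.1)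
        = (alive.filter (fun p => !pvCollisionLoop (v :: rest) p.1 mod_size p.2)).map (·.1) := by
  intro alive
  induction alive with
  | nil => simp [pvPrune]
  | cons p tl ih =>
    by_cases h : PySem.Int.mod (PySem.Int.bxor v p.1) mod_size ∈ p.2
    · have hc : pvCollisionLoop (v :: rest) p.1 mod_size p.2 = true := by
        simp [pvCollisionLoop, h]
      simp only [pvPrune, List.filterMap_cons, List.filter_cons, hc] at ih ⊢
      simpa [h] using ih
    · have hc : pvCollisionLoop (v :: rest) p.1 mod_size p.2
          = pvCollisionLoop rest p.1 mod_size
              (PySem.Set.add p.2 (PySem.Int.mod (PySem.Int.bxor v p.1) mod_size)) := by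
        simp [pvCollisionLoop, h]
      rcases Bool.eq_false_or_eq_true
          (pvCollisionLoop rest p.1 mod_size
            (PySem.Set.add p.2 (PySem.Int.mod (PySem.Int.bxor v p.1) mod_size))) with h2 | h2
      · simp only [pvPrune, List.filterMap_cons, List.filter_cons] at ih ⊢
        rw [PySem.Set.add_of_not_mem h] at h2 hc
        simp [h, hc, h2]
        simpa using ih
      · simp only [pvPrune, List.filterMap_cons, List.filter_cons] at ih ⊢
        rw [PySem.Set.add_of_not_mem h] at h2 hc
        simp [h, hc, h2]
        simpa using ih

-- B's pass = head of the candidates that survive the whole list, in seed order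
theorem altLoop_eq_filter_head (mod_size : Int) :
    ∀ (vals : List Int) (alive : List (Int × PySem.Set Int)),
      pvAltLoop vals mod_size alive
        = ((alive.filter (fun p => !pvCollisionLoop vals p.1 mod_size p.2)).map (·.1)).head? := by
  intro vals
  induction vals with
  | nil =>
    intro alive
    simp [pvAltLoop, pvCollisionLoop, List.head?_map]
  | cons v rest ih =>
    intro alive
    simp only [pvAltLoop]
    rw [← prune_filter_map_fst mod_size v rest alive]
    by_cases he : (pvPrune mod_size v alive).isEmpty
    · rw [if_pos he]
      rw [List.isEmpty_iff] at he
      simp [he]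
    · rw [if_neg he]
      exact ih _

-- generic: first match = head of filter
theorem find?_eq_head_filter (q : Int → Bool) :
    ∀ l : List Int, l.find? q = (l.filter q).head? := by
  intro l
  induction l with
  | nil => simp
  | cons x tl ih =>
    rcases Bool.eq_false_or_eq_true (q x) with h | h
    · simp [List.find?_cons, List.filter_cons, h, ih]
    · simp [List.find?_cons, List.filter_cons, h]

-- A's seed loop = first collision-free seed
theorem seedLoop_eq_find? (epc_ints : List Int) (mod_size : Int) :
    ∀ seeds : List Int,
      pvSeedLoop seeds epc_ints mod_size
        = seeds.find? (fun s => !pvCollisionLoop epc_ints s mod_size PySem.Set.empty) := by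
  intro seeds
  induction seeds with
  | nil => simp [pvSeedLoop]
  | cons s tl ih =>
    rcases Bool.eq_false_or_eq_true (pvCollisionLoop epc_ints s mod_size PySem.Set.empty) with h | h <;>
      simp only [PySem.Set.empty] at h ih <;>
      simp [pvSeedLoop, List.find?_cons, h, ih]

-- pairing the seeds with empty sets, filtering, and projecting back = filtering the seeds
theorem map_pair_filter (epc_ints : List Int) (mod_size : Int) :
    ∀ seeds : List Int,
      (((seeds.map (fun s => (s, (PySem.Set.empty : PySem.Set Int)))).filter
          (fun p => !pvCollisionLoop epc_ints p.1 mod_size p.2)).map (·.1))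
        = seeds.filter (fun s => !pvCollisionLoop epc_ints s mod_size PySem.Set.empty) := by
  intro seeds
  induction seeds with
  | nil => simp
  | cons s tl ih =>
    rcases Bool.eq_false_or_eq_true (pvCollisionLoop epc_ints s mod_size PySem.Set.empty) with h | h <;>
      simp only [PySem.Set.empty] at h ih <;>
      simp [List.map_cons, List.filter_cons, h, ih]

-- ===== VERDICT (by name: the statement is the Claim_ definition above) =====
theorem find_perfect_seed_py_spec : Claim_equal_find_perfect_seed_py := by
  intro epc_ints mod_size _ _
  unfold Spec_find_perfect_seed_py find_perfect_seed_py find_perfect_seed_py_alt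
  rw [altLoop_eq_filter_head, map_pair_filter, seedLoop_eq_find?, find?_eq_head_filter]
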